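-- pv_equiv track=rewrite | github.com/S-A-I-V/CodeForcesProblem | distsplit.py | max_distinct_split
-- ===== SOURCE A (Python) =====
-- def max_distinct_split(t, test_cases):
--     results = []
--     for n, s in test_cases:
--         left = [0] * 26
--         right = [0] * 26
--
--         for char in s:
--             right[ord(char) - ord('a')] += 1
--
--         distinct_a = 0
--         distinct_b = sum(1 for x in right if x > 0)
--         max_sum = distinct_a + distinct_b
--
--         for char in s:
--             idx = ord(char) - ord('a')
--             if right[idx] == 1:
--                 distinct_b -= 1
--             right[idx] -= 1
--
--             if left[idx] == 0:
--                 distinct_a += 1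
--             left[idx] += 1
--             max_sum = max(max_sum, distinct_a + distinct_b)
--
--         results.append(max_sum)
--
--     return results
-- ===== SOURCE B (Python) =====
-- def max_distinct_split(t, test_cases):
--     results = []
--     for n, s in test_cases:
--         # prefix scan: pre[i] = number of distinct letters in s[:i]
--         pre = [0]
--         cnt = [0] * 26
--         d = 0
--         for ch in s:
--             i = ord(ch) - ord('a')
--             if cnt[i] == 0:
--                 d += 1
--             cnt[i] += 1
--             pre.append(d)
--         # suffix scan: same scan over the reversed string, then reverse it,
--         # so suf[i] = number of distinct letters in s[i:]
--         rev = [0]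
--         cnt = [0] * 26
--         d = 0
--         for ch in reversed(s):
--             i = ord(ch) - ord('a')
--             if cnt[i] == 0:
--                 d += 1
--             cnt[i] += 1
--             rev.append(d)
--         suf = rev[::-1]
--         results.append(max(p + q for p, q in zip(pre, suf)))
--     return results
-- ===== Notes on version B (the rewrite author's own statement) =====
-- stated objective: alternative
-- what changed: B replaces A's single stateful sweep (which pre-counts the whole string and then transfers character counts from the right-hand count array to the left-hand one while tracking both distinct counts and a running max) by two independent one-directional scans building a prefix-distinct array and a suffix-distinct array, then takes the max of their pointwise sums over all split points.
import Mathlib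
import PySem

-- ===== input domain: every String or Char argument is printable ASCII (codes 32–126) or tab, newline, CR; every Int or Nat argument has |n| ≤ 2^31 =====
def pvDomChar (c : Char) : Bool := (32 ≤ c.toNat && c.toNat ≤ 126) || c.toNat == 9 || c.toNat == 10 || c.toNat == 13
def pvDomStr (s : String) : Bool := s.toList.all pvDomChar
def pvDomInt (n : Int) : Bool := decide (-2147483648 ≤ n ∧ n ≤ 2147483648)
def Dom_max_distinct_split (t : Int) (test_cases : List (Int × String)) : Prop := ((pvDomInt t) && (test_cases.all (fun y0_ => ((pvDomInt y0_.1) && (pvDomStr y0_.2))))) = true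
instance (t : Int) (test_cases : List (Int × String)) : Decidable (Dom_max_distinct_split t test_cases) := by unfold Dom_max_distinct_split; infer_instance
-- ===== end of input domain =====

-- B computes each answer by two independent prefix/suffix distinct-count scans instead of
-- A's single stateful sweep that transfers counts between two arrays; same cost, different shape.

-- ===== PORT A =====

-- Python list index `ord(c) - ord('a')` into a 26-slot array, with Python's negative-index
-- wraparound; exact for indices in [-26, 25], which Pre_ guarantees (outside it Python raises
-- IndexError).
def cidx (c : Char) : Nat := ((((c.toNat : Int)) - 97) % 26).toNat

-- `right[ord(char) - ord('a')] += 1`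
def incr26 (a : List Int) (i : Nat) : List Int := a.set i (a.getD i 0 + 1)

-- state: (right, left, distinct_a, distinct_b, max_sum)
def stepA (st : List Int × List Int × Int × Int × Int) (c : Char) :
    List Int × List Int × Int × Int × Int :=
  let (right, left, da, db, ms) := st
  let i := cidx c
  let db' := if right.getD i 0 == 1 then db - 1 else db
  let right' := right.set i (right.getD i 0 - 1)
  let da' := if left.getD i 0 == 0 then da + 1 else da
  let left' := left.set i (left.getD i 0 + 1)
  (right', left', da', db', max ms (da' + db'))

def caseA (s : String) : Int :=
  let right := s.toList.foldl (fun a c => incr26 a (cidx c)) (List.replicate 26 0)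
  let db := right.foldl (fun acc x => if 0 < x then acc + 1 else acc) (0 : Int)
  (s.toList.foldl stepA (right, List.replicate 26 0, 0, db, 0 + db)).2.2.2.2

def max_distinct_split (t : Int) (test_cases : List (Int × String)) : List Int :=
  test_cases.foldl (fun results nc => results ++ [caseA nc.2]) []

-- ===== PORT B =====

-- same Python indexing `ord(c) - ord('a')` (with negative-index wraparound) as in A's source;
-- exact for indices in [-26, 25], which Pre_ guarantees.
def bidx (c : Char) : Nat := ((((c.toNat : Int)) - 97) % 26).toNat

-- one scan: state (cnt, d, out); appends the running distinct count after each char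
def stepB (st : List Int × Int × List Int) (c : Char) : List Int × Int × List Int :=
  let (cnt, d, out) := st
  let i := bidx c
  let d' := if cnt.getD i 0 == 0 then d + 1 else d
  (cnt.set i (cnt.getD i 0 + 1), d', out ++ [d'])

def scanDistinct (cs : List Char) : List Int :=
  (cs.foldl stepB (List.replicate 26 0, 0, [0])).2.2

def caseB (s : String) : Int :=
  let pre := scanDistinct s.toList
  let rev := scanDistinct s.toList.reverse
  let suf := rev.reverse
  let sums := List.zipWith (· + ·) pre suf
  match sums with
  | [] => 0          -- unreachable: both lists are nonempty
  | x :: xs => xs.foldl max x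

def max_distinct_split_alt (t : Int) (test_cases : List (Int × String)) : List Int :=
  test_cases.map (fun nc => caseB nc.2)

-- ===== PRECONDITION & SPEC =====
-- Pre_ excludes exactly the inputs where Python A raises IndexError: a character whose
-- code is outside [71, 122] gives a list index outside [-26, 25] for a 26-slot array.
def Pre_max_distinct_split (t : Int) (test_cases : List (Int × String)) : Prop :=
  (test_cases.all (fun p => p.2.toList.all (fun c => 71 ≤ c.toNat && c.toNat ≤ 122))) = true
instance (t : Int) (test_cases : List (Int × String)) : Decidable (Pre_max_distinct_split t test_cases) := by unfold Pre_max_distinct_split; infer_instance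

def pvWitness_max_distinct_split : Int × (List (Int × String)) := (1, [(3, "aab"), (2, "Zz")])

def Spec_max_distinct_split (t : Int) (test_cases : List (Int × String)) (out : List Int) : Prop := out = max_distinct_split_alt t test_cases
instance (t : Int) (test_cases : List (Int × String)) (out : List Int) : Decidable (Spec_max_distinct_split t test_cases out) := by unfold Spec_max_distinct_split; infer_instance

-- ===== CLAIM (what is proved, stated in full; the proofs are below) =====
def Claim_equal_max_distinct_split : Prop := ∀ (t : Int) (test_cases : List (Int × String)), Dom_max_distinct_split t test_cases → Pre_max_distinct_split t test_cases → Spec_max_distinct_split t test_cases (max_distinct_split t test_cases)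

-- ===== LEMMAS AND PROOFS =====

-- distinct count of a list of indices
def D (l : List Nat) : Int := (l.toFinset.card : Int)

-- the 26-slot count array of a list of indices
def cnt (l : List Nat) : List Int := (List.range 26).map (fun k => ((l.count k : Nat) : Int))

-- terms D (p ++ q.take k) + D (q.drop k) for k = 1 .. q.length
def tailTerms : List Nat → List Nat → List Int
  | _, [] => []
  | p, j :: js => (D (p ++ [j]) + D js) :: tailTerms (p ++ [j]) js

-- running prefix distinct counts (one per consumed element)
def preList : List Nat → List Nat → List Int
  | _, [] => []
  | p, j :: js => D (p ++ [j]) :: preList (p ++ [j]) js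

-- distinct counts of all suffixes
def sufList : List Nat → List Int
  | [] => [0]
  | j :: js => D (j :: js) :: sufList js

lemma cidx_lt (c : Char) : cidx c < 26 := by
  have h1 : (0:Int) ≤ ((c.toNat : Int) - 97) % 26 := Int.emod_nonneg _ (by norm_num)
  have h2 : ((c.toNat : Int) - 97) % 26 < 26 := Int.emod_lt_of_pos _ (by norm_num)
  unfold cidx
  omega

lemma map_cidx_lt (cs : List Char) : ∀ j ∈ cs.map cidx, j < 26 := by
  intro j hj
  rcases List.mem_map.1 hj with ⟨c, _, rfl⟩
  exact cidx_lt c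

lemma D_nil : D [] = 0 := by simp [D]

lemma D_cons (j : Nat) (l : List Nat) :
    D (j :: l) = D l + (if j ∈ l then 0 else 1) := by
  unfold D
  rw [List.toFinset_cons]
  by_cases h : j ∈ l
  · rw [Finset.insert_eq_self.2 (List.mem_toFinset.2 h), if_pos h, add_zero]
  · rw [Finset.card_insert_of_notMem (fun hc => h (List.mem_toFinset.1 hc)), if_neg h]
    push_cast; ring

lemma D_snoc (p : List Nat) (j : Nat) :
    D (p ++ [j]) = D p + (if j ∈ p then 0 else 1) := by
  have ht : (p ++ [j]).toFinset = (j :: p).toFinset := by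
    ext k; simp [List.mem_append, or_comm]
  have : D (p ++ [j]) = D (j :: p) := by unfold D; rw [ht]
  rw [this, D_cons]

lemma cnt_length (l : List Nat) : (cnt l).length = 26 := by simp [cnt]

lemma cnt_getD (l : List Nat) (j : Nat) (hj : j < 26) :
    (cnt l).getD j 0 = ((l.count j : Nat) : Int) := by
  rw [List.getD_eq_getElem _ _ (by simpa [cnt_length] using hj)]
  simp [cnt]

lemma cnt_nil : cnt [] = List.replicate 26 0 := by
  apply List.ext_getElem (by simp [cnt_length])
  intro i h1 h2
  simp [cnt]

lemma cnt_set_incr (l : List Nat) (j : Nat) (hj : j < 26) :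
    (cnt l).set j (((l.count j : Nat) : Int) + 1) = cnt (l ++ [j]) := by
  apply List.ext_getElem (by simp [cnt_length])
  intro i hi1 hi2
  have hi : i < 26 := by simpa [cnt_length] using hi1
  simp only [cnt, List.getElem_set, List.getElem_map, List.getElem_range, List.count_append,
    List.count_cons, List.count_nil]
  by_cases h : j = i
  · subst h; simp
  · have h' : ¬ (i = j) := fun e => h e.symm
    simp [h, h']

lemma cnt_set_decr (l : List Nat) (j : Nat) (hj : j < 26) :
    (cnt (j :: l)).set j ((((j :: l).count j : Nat) : Int) - 1) = cnt l := by
  apply List.ext_getElem (by simp [cnt_length])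
  intro i hi1 hi2
  have hi : i < 26 := by simpa [cnt_length] using hi1
  simp only [cnt, List.getElem_set, List.getElem_map, List.getElem_range, List.count_cons]
  by_cases h : j = i
  · subst h; simp
  · have h' : ¬ (i = j) := fun e => h e.symm
    simp [h, h']

-- the first loop of A builds the count array of the whole string
lemma buildRight (js : List Nat) (h : ∀ j ∈ js, j < 26) :
    js.foldl (fun a j => incr26 a j) (List.replicate 26 0) = cnt js := by
  induction js using List.reverseRecOn with
  | nil => exact cnt_nil.symm
  | append_singleton js j ih =>
      rw [List.foldl_append]
      have hb : ∀ i ∈ js, i < 26 := fun i hi => h i (by simp [hi])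
      rw [ih hb]
      show incr26 (cnt js) j = cnt (js ++ [j])
      unfold incr26
      rw [cnt_getD _ _ (h j (by simp)), cnt_set_incr _ _ (h j (by simp))]

-- counting positives of a count array = number of distinct indices
lemma countP_or (l : List Nat) (j : Nat) (p : Nat → Bool) : l.Nodup → p j = false → j ∈ l →
    l.countP (fun k => decide (k = j) || p k) = l.countP p + 1 := by
  induction l with
  | nil => intro _ _ h; cases h
  | cons a l ih =>
      intro hnd hpj hmem
      rw [List.nodup_cons] at hnd
      by_cases haj : a = j
      · subst haj
        have hc : l.countP (fun k => decide (k = a) || p k) = l.countP p := by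
          apply List.countP_congr
          intro k hk
          have : k ≠ a := fun e => hnd.1 (e ▸ hk)
          simp [this]
        simp [List.countP_cons, hc, hpj]
      · have hmem' : j ∈ l := by
          rcases List.mem_cons.1 hmem with he | he
          · exact absurd he.symm haj
          · exact he
        rw [List.countP_cons, List.countP_cons, ih hnd.2 hpj hmem']
        simp [haj]
        omega

lemma countP_range_mem (js : List Nat) (h : ∀ j ∈ js, j < 26) :
    (List.range 26).countP (fun k => decide (k ∈ js)) = js.toFinset.card := by
  induction js with
  | nil => simp
  | cons j l ih =>
      have hb : ∀ i ∈ l, i < 26 := fun i hi => h i (List.mem_cons_of_mem _ hi)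
      by_cases hm : j ∈ l
      · have hc : (List.range 26).countP (fun k => decide (k ∈ j :: l))
            = (List.range 26).countP (fun k => decide (k ∈ l)) := by
          apply List.countP_congr
          intro k _
          by_cases hk : k ∈ l
          · simp [hk, List.mem_cons]
          · have : k ≠ j := fun e => hk (e ▸ hm)
            simp [hk, List.mem_cons, this]
        rw [hc, ih hb, List.toFinset_cons, Finset.insert_eq_self.2 (List.mem_toFinset.2 hm)]
      · have hcong : (List.range 26).countP (fun k => decide (k ∈ j :: l))
            = (List.range 26).countP (fun k => decide (k = j) || decide (k ∈ l)) := by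
          apply List.countP_congr
          intro k _
          simp [List.mem_cons]
        rw [hcong, countP_or _ _ _ (List.nodup_range) (by simpa using hm)
              (List.mem_range.2 (h j (List.mem_cons_self)))]
        rw [ih hb, List.toFinset_cons,
          Finset.card_insert_of_notMem (fun hc => hm (List.mem_toFinset.1 hc))]

lemma countPos_fold (l : List Int) (a : Int) :
    l.foldl (fun acc x => if 0 < x then acc + 1 else acc) a
      = a + (l.countP (fun x => decide (0 < x)) : Nat) := by
  induction l generalizing a with
  | nil => simp
  | cons x l ih =>
      simp only [List.foldl_cons, List.countP_cons, ih]
      by_cases h : 0 < x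
      · simp [h]; push_cast; ring
      · simp [h]

lemma db_init (js : List Nat) (h : ∀ j ∈ js, j < 26) :
    (cnt js).foldl (fun acc x => if 0 < x then acc + 1 else acc) (0 : Int) = D js := by
  rw [countPos_fold]
  unfold cnt D
  rw [List.countP_map]
  have hc : (List.range 26).countP ((fun x => decide (0 < x)) ∘ fun k => ((js.count k : Nat) : Int))
      = (List.range 26).countP (fun k => decide (k ∈ js)) := by
    apply List.countP_congr
    intro k _
    simp [Function.comp, List.count_pos_iff]
  rw [hc, countP_range_mem js h]
  simp

-- index-level version of A's loop step
def stepAIdx (st : List Int × List Int × Int × Int × Int) (i : Nat) :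
    List Int × List Int × Int × Int × Int :=
  let (right, left, da, db, ms) := st
  let db' := if right.getD i 0 == 1 then db - 1 else db
  let right' := right.set i (right.getD i 0 - 1)
  let da' := if left.getD i 0 == 0 then da + 1 else da
  let left' := left.set i (left.getD i 0 + 1)
  (right', left', da', db', max ms (da' + db'))

lemma foldl_stepA_map (cs : List Char) (st : List Int × List Int × Int × Int × Int) :
    cs.foldl stepA st = (cs.map cidx).foldl stepAIdx st := by
  rw [List.foldl_map]
  rfl

lemma foldl_incr_map (cs : List Char) (init : List Int) :
    cs.foldl (fun a c => incr26 a (cidx c)) init = (cs.map cidx).foldl (fun a j => incr26 a j) init := by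
  rw [List.foldl_map]

def stepBIdx (st : List Int × Int × List Int) (i : Nat) : List Int × Int × List Int :=
  let (cnt, d, out) := st
  let d' := if cnt.getD i 0 == 0 then d + 1 else d
  (cnt.set i (cnt.getD i 0 + 1), d', out ++ [d'])

lemma foldl_stepB_map (cs : List Char) (st : List Int × Int × List Int) :
    cs.foldl stepB st = (cs.map cidx).foldl stepBIdx st := by
  rw [List.foldl_map]
  rfl

lemma stepAIdx_eq (q p : List Nat) (j : Nat) (ms : Int) (hj : j < 26) :
    stepAIdx (cnt (j :: q), cnt p, D p, D (j :: q), ms) j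
      = (cnt q, cnt (p ++ [j]), D (p ++ [j]), D q, max ms (D (p ++ [j]) + D q)) := by
  unfold stepAIdx
  simp only [cnt_getD _ _ hj, cnt_set_decr _ _ hj, cnt_set_incr _ _ hj]
  have hda : (if ((((p.count j : Nat)) : Int) == 0) = true then D p + 1 else D p) = D (p ++ [j]) := by
    by_cases hp : j ∈ p
    · rw [if_neg (by simp [List.count_eq_zero, hp]), D_snoc, if_pos hp, add_zero]
    · rw [if_pos (by simp [List.count_eq_zero, hp]), D_snoc, if_neg hp]
  have hdb : (if (((((j :: q).count j : Nat)) : Int) == 1) = true then D (j :: q) - 1 else D (j :: q)) = D q := by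
    rw [D_cons]
    by_cases hq : j ∈ q
    · have h1 : ¬ ((((((j :: q).count j : Nat)) : Int) == 1) = true) := by
        have hpos := List.count_pos_iff.mpr hq
        simp [List.count_cons_self, beq_iff_eq]
        omega
      rw [if_neg h1, if_pos hq, add_zero]
    · have h1 : (((((j :: q).count j : Nat)) : Int) == 1) = true := by
        have h0 := List.count_eq_zero.mpr hq
        simp [List.count_cons_self, beq_iff_eq, h0]
      rw [if_pos h1, if_neg hq]
      ring
  rw [hda, hdb]

lemma mainA (q : List Nat) : ∀ (p : List Nat) (ms : Int), (∀ j ∈ q, j < 26) →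
    (q.foldl stepAIdx (cnt q, cnt p, D p, D q, ms)).2.2.2.2
      = List.foldl max ms (tailTerms p q) := by
  induction q with
  | nil => intro p ms _; simp [tailTerms]
  | cons j js ih =>
      intro p ms h
      rw [List.foldl_cons, stepAIdx_eq _ _ _ _ (h j List.mem_cons_self)]
      rw [ih (p ++ [j]) _ (fun i hi => h i (List.mem_cons_of_mem _ hi))]
      simp [tailTerms]

lemma stepBIdx_eq (p : List Nat) (j : Nat) (acc : List Int) (hj : j < 26) :
    stepBIdx (cnt p, D p, acc) j = (cnt (p ++ [j]), D (p ++ [j]), acc ++ [D (p ++ [j])]) := by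
  unfold stepBIdx
  simp only [cnt_getD _ _ hj, cnt_set_incr _ _ hj]
  have hd : (if ((((p.count j : Nat)) : Int) == 0) = true then D p + 1 else D p) = D (p ++ [j]) := by
    by_cases hp : j ∈ p
    · rw [if_neg (by simp [List.count_eq_zero, hp]), D_snoc, if_pos hp, add_zero]
    · rw [if_pos (by simp [List.count_eq_zero, hp]), D_snoc, if_neg hp]
  rw [hd]

lemma mainB (q : List Nat) : ∀ (p : List Nat) (acc : List Int), (∀ j ∈ q, j < 26) →
    (q.foldl stepBIdx (cnt p, D p, acc)).2.2 = acc ++ preList p q := by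
  induction q with
  | nil => intro p acc _; simp [preList]
  | cons j js ih =>
      intro p acc h
      rw [List.foldl_cons, stepBIdx_eq _ _ _ (h j List.mem_cons_self)]
      rw [ih (p ++ [j]) _ (fun i hi => h i (List.mem_cons_of_mem _ hi))]
      simp [preList]

lemma scan_eq (cs : List Char) : scanDistinct cs = 0 :: preList [] (cs.map cidx) := by
  unfold scanDistinct
  rw [foldl_stepB_map]
  have h := mainB (cs.map cidx) [] [0] (map_cidx_lt cs)
  rw [cnt_nil, D_nil] at h
  simpa using h

lemma preList_snoc (xs : List Nat) : ∀ (p : List Nat) (j : Nat),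
    preList p (xs ++ [j]) = preList p xs ++ [D (p ++ xs ++ [j])] := by
  induction xs with
  | nil => intro p j; simp [preList]
  | cons x xs ih =>
      intro p j
      simp only [List.cons_append, preList, ih (p ++ [x]) j]
      simp

lemma suf_eq (ys : List Nat) : ((0 : Int) :: preList [] ys.reverse).reverse = sufList ys := by
  induction ys with
  | nil => simp [preList, sufList]
  | cons y ys ih =>
      have hrev : (y :: ys).reverse = ys.reverse ++ [y] := by simp
      rw [hrev, preList_snoc]
      have hD : D (([] : List Nat) ++ ys.reverse ++ [y]) = D (y :: ys) := by
        unfold D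
        have hts : (([] : List Nat) ++ ys.reverse ++ [y]).toFinset = (y :: ys).toFinset := by
          ext k
          simp [or_comm]
        rw [hts]
      rw [hD]
      have hsplit : ((0 : Int) :: (preList [] ys.reverse ++ [D (y :: ys)]))
          = ((0 : Int) :: preList [] ys.reverse) ++ [D (y :: ys)] := by simp
      rw [hsplit, List.reverse_append, ih]
      simp [sufList]

lemma zip_sums (q : List Nat) : ∀ p : List Nat,
    List.zipWith (· + ·) (D p :: preList p q) (sufList q)
      = (D p + D q) :: tailTerms p q := by
  induction q with
  | nil => intro p; simp [preList, sufList, tailTerms, D_nil]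
  | cons j js ih =>
      intro p
      simp only [preList, sufList, tailTerms, List.zipWith]
      rw [ih (p ++ [j])]

lemma foldl_snoc_map (tcs : List (Int × String)) :
    ∀ acc : List Int, tcs.foldl (fun results nc => results ++ [caseA nc.2]) acc
      = acc ++ tcs.map (fun nc => caseA nc.2) := by
  induction tcs with
  | nil => intro acc; simp
  | cons x xs ih => intro acc; simp [ih]

lemma caseA_eq (s : String) :
    caseA s = List.foldl max (0 + D (s.toList.map cidx)) (tailTerms [] (s.toList.map cidx)) := by
  have hb := map_cidx_lt s.toList
  have hR : s.toList.foldl (fun a c => incr26 a (cidx c)) (List.replicate 26 0)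
      = cnt (s.toList.map cidx) := by
    rw [foldl_incr_map]
    exact buildRight _ hb
  have hDB := db_init (s.toList.map cidx) hb
  have h := mainA (s.toList.map cidx) [] (0 + D (s.toList.map cidx)) hb
  rw [cnt_nil, D_nil] at h
  calc caseA s
      = (s.toList.foldl stepA (cnt (s.toList.map cidx), List.replicate 26 0, 0,
          D (s.toList.map cidx), 0 + D (s.toList.map cidx))).2.2.2.2 := by
        simp only [caseA, hR, hDB]
    _ = _ := by rw [foldl_stepA_map]; exact h

lemma caseB_eq (s : String) :
    caseB s = List.foldl max (0 + D (s.toList.map cidx)) (tailTerms [] (s.toList.map cidx)) := by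
  have hpre := scan_eq s.toList
  have hrev : scanDistinct s.toList.reverse
      = 0 :: preList [] ((s.toList.map cidx).reverse) := by
    rw [scan_eq, List.map_reverse]
  have hsuf := suf_eq (s.toList.map cidx)
  have hz := zip_sums (s.toList.map cidx) []
  rw [D_nil] at hz
  simp only [caseB, hpre, hrev, hsuf, hz]

-- ===== VERDICT (by name: the statement is the Claim_ definition above) =====
theorem max_distinct_split_spec : Claim_equal_max_distinct_split := by
  intro t tcs _ _
  unfold Spec_max_distinct_split max_distinct_split max_distinct_split_alt
  rw [foldl_snoc_map tcs []]
  simp only [List.nil_append]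
  apply List.map_congr_left
  intro nc _
  rw [caseA_eq, caseB_eq]
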